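-- pv_equiv track=rewrite | github.com/ASSERT-KTH/DET-Gen | experiments/pynguin/c4b/single-return/generated_tests/src_2566/2/src_2566.py | func
-- ===== SOURCE A (Python) =====
-- def func(*args):
--
--
-- 	def check_triangle():
-- 	    input_list = args[0].split()
-- 	    i = 0
-- 	    while (i < len(input_list)):
-- 	        input_list[i] = int(input_list[i])
-- 	        i += 1
-- 	    input_list = sorted(input_list)
-- 	    i = 0
-- 	    while (i < (len(input_list) - 2)):
-- 	        if ((int(input_list[i]) + int(input_list[(i + 1)])) > int(input_list[(i + 2)])):
-- 	            return 'TRIANGLE'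
-- 	        i += 1
-- 	    i = 0
-- 	    while (i < (len(input_list) - 2)):
-- 	        if ((int(input_list[i]) + int(input_list[(i + 1)])) == int(input_list[(i + 2)])):
-- 	            return 'SEGMENT'
-- 	        i += 1
-- 	    return 'IMPOSSIBLE'
-- 	return(check_triangle())
-- ===== SOURCE B (Python) =====
-- def func(*args):
--     tokens = sorted(int(t) for t in args[0].split())
--     segment_found = False
--     for a, b, c in zip(tokens, tokens[1:], tokens[2:]):
--         if a + b > c:
--             return 'TRIANGLE'
--         if a + b == c:
--             segment_found = True
--     return 'SEGMENT' if segment_found else 'IMPOSSIBLE'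
-- ===== Notes on version B (the rewrite author's own statement) =====
-- stated objective: simpler
-- what changed: Replaces A's two separate sequential scans (one for TRIANGLE, a second full rescan for SEGMENT) by a single pass over adjacent triples that returns TRIANGLE immediately and accumulates a boolean segment flag.
import Mathlib
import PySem

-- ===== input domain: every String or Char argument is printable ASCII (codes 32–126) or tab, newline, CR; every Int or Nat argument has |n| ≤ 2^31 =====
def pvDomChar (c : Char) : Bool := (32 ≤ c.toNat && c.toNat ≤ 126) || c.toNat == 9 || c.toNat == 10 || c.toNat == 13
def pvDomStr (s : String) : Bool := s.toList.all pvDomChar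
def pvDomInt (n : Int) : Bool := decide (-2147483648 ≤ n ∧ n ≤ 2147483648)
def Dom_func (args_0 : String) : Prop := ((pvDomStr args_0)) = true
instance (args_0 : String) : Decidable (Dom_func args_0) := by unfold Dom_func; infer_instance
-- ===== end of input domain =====

-- B replaces A's two sequential scans by one pass with an accumulated segment flag (simpler).

-- ===== PORT A =====
-- first while-loop over i: return 'TRIANGLE' at the first i with l[i]+l[i+1] > l[i+2]
def funcLoopT : List Int → Option String
  | a :: b :: c :: rest => if a + b > c then some "TRIANGLE" else funcLoopT (b :: c :: rest)
  | _ => none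

-- second while-loop over i: return 'SEGMENT' at the first i with l[i]+l[i+1] = l[i+2]
def funcLoopS : List Int → Option String
  | a :: b :: c :: rest => if a + b = c then some "SEGMENT" else funcLoopS (b :: c :: rest)
  | _ => none

def func (args_0 : String) : String :=
  let toks := PySem.Str.split₀ args_0
  -- first while-loop converts each token with int(); a failing int() raises, excluded by Pre_
  let ints := toks.map (fun t => (PySem.Int.ofStr? t).getD 0)
  let l := PySem.List.sorted ints id
  match funcLoopT l with
  | some s => s
  | none =>
    match funcLoopS l with
    | some s => s
    | none => "IMPOSSIBLE"

-- ===== PORT B =====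
-- one pass over adjacent triples, carrying the segment flag
def funcScan : List Int → Bool → String
  | a :: b :: c :: rest, seg =>
    if a + b > c then "TRIANGLE"
    else funcScan (b :: c :: rest) (seg || decide (a + b = c))
  | _, seg => if seg then "SEGMENT" else "IMPOSSIBLE"

def func_alt (args_0 : String) : String :=
  let tokens := PySem.List.sorted ((PySem.Str.split₀ args_0).map (fun t => (PySem.Int.ofStr? t).getD 0)) id
  funcScan tokens false

-- ===== PRECONDITION & SPEC =====
-- Pre_ excludes exactly the inputs where int(token) raises ValueError in both Pythons.
def Pre_func (args_0 : String) : Prop :=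
  ∀ t ∈ PySem.Str.split₀ args_0, (PySem.Int.ofStr? t).isSome = true
instance (args_0 : String) : Decidable (Pre_func args_0) := by unfold Pre_func; infer_instance
def pvWitness_func : String := "4 4 4"

def Spec_func (args_0 : String) (out : String) : Prop := out = func_alt args_0
instance (args_0 : String) (out : String) : Decidable (Spec_func args_0 out) := by unfold Spec_func; infer_instance

-- ===== CLAIM (what is proved, stated in full; the proofs are below) =====
def Claim_equal_func : Prop := ∀ (args_0 : String), Dom_func args_0 → Pre_func args_0 → Spec_func args_0 (func args_0)

-- ===== LEMMAS AND PROOFS =====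

theorem funcScan_eq (l : List Int) : ∀ seg : Bool,
    funcScan l seg =
      match funcLoopT l with
      | some s => s
      | none => if seg then "SEGMENT" else ((funcLoopS l).getD "IMPOSSIBLE") := by
  induction l with
  | nil => intro seg; cases seg <;> simp [funcScan, funcLoopT, funcLoopS]
  | cons a t ih =>
    cases t with
    | nil => intro seg; cases seg <;> simp [funcScan, funcLoopT, funcLoopS]
    | cons b t2 =>
      cases t2 with
      | nil => intro seg; cases seg <;> simp [funcScan, funcLoopT, funcLoopS]
      | cons c rest =>
        intro seg
        by_cases hgt : a + b > c
        · simp [funcScan, funcLoopT, hgt]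
        · rw [show funcScan (a :: b :: c :: rest) seg
              = funcScan (b :: c :: rest) (seg || decide (a + b = c)) by
            simp [funcScan, hgt]]
          rw [ih]
          by_cases heq : a + b = c
          · cases hT : funcLoopT (b :: c :: rest) <;>
              cases seg <;>
              simp [funcLoopT, funcLoopS, heq, hT]
          · cases hT : funcLoopT (b :: c :: rest) <;>
              cases seg <;>
              simp [funcLoopT, funcLoopS, hgt, heq, hT]

theorem funcScan_false_eq (l : List Int) :
    funcScan l false =
      match funcLoopT l with
      | some s => s
      | none =>
        match funcLoopS l with
        | some s => s
        | none => "IMPOSSIBLE" := by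
  rw [funcScan_eq]
  cases funcLoopT l
  · cases funcLoopS l <;> simp
  · simp

-- ===== VERDICT (by name: the statement is the Claim_ definition above) =====
theorem func_spec : Claim_equal_func := by
  intro args_0 _ _
  unfold Spec_func func func_alt
  rw [funcScan_false_eq]
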